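-- pv_equiv track=rewrite | github.com/moe18/crossword-creator | src/crossword_solver/solver.py | get_h_words
-- ===== SOURCE A (Python) =====
-- def get_h_words(p):
--     words_h = []
--     for row in p:
--         current_word = ''
--         for letter in row:
--             if letter != '0':
--                 current_word += letter
--             else:
--                 if len(current_word) > 0:
--                     words_h.append(current_word)
--                 current_word = ''
--     return words_h
-- ===== SOURCE B (Python) =====
-- def get_h_words(p):
--     words = []
--     for row in p:
--         prev = 0
--         for i, x in enumerate(row):
--             if x == '0':
--                 w = ''.join(row[prev:i])
--                 if w:
--                     words.append(w)
--                 prev = i + 1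
--     return words
-- ===== Notes on version B (the rewrite author's own statement) =====
-- stated objective: alternative
-- what changed: Instead of accumulating a growing current_word character by character, B records the index after the last '0' and, at each '0', joins the slice row[prev:i] in one step; the per-letter string accumulator disappears.
import Mathlib
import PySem

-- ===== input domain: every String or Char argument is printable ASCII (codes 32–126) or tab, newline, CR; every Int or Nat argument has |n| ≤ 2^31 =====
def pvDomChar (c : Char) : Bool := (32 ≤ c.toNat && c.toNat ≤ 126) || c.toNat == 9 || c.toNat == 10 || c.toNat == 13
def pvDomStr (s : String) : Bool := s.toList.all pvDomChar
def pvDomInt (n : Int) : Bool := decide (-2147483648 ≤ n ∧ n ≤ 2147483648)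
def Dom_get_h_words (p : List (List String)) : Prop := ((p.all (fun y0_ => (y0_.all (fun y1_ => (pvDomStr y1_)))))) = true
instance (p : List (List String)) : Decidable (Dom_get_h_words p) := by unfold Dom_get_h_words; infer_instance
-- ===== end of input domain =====

-- B replaces A's letter-by-letter string accumulator by recording the index after the last '0'
-- and joining the slice row[prev:i] at each '0' (alternative decomposition, same cost).

-- ===== PORT A =====
-- inner-loop body of A: accumulate the letter, or flush current_word at a '0'
def stepA (st : List String × String) (letter : String) : List String × String :=
  if letter ≠ "0" then (st.1, st.2 ++ letter)
  else (if PySem.Str.len st.2 > 0 then st.1 ++ [st.2] else st.1, "")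

def get_h_words (p : List (List String)) : List String :=
  p.foldl (fun words_h row => (row.foldl stepA (words_h, "")).1) []

-- ===== PORT B =====
-- inner-loop body of B: at a '0' join the slice row[prev:i]; state = (words, prev)
def stepB (row : List String) (st : List String × Int) (ix : Int × String) : List String × Int :=
  if ix.2 = "0" then
    let w := PySem.Str.join "" (PySem.List.slice row (some st.2) (some ix.1))
    (if w ≠ "" then st.1 ++ [w] else st.1, ix.1 + 1)
  else st

def get_h_words_alt (p : List (List String)) : List String :=
  p.foldl (fun words row => ((PySem.List.enumerate row 0).foldl (stepB row) (words, 0)).1) []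

-- ===== PRECONDITION & SPEC =====
def Spec_get_h_words (p : List (List String)) (out : List String) : Prop := out = get_h_words_alt p
instance (p : List (List String)) (out : List String) : Decidable (Spec_get_h_words p out) := by unfold Spec_get_h_words; infer_instance

-- ===== CLAIM (what is proved, stated in full; the proofs are below) =====
def Claim_equal_get_h_words : Prop := ∀ (p : List (List String)), Dom_get_h_words p → Spec_get_h_words p (get_h_words p)

-- ===== LEMMAS AND PROOFS =====

theorem pvJoinNilChars (l : List (List Char)) : PySem.Chars.join [] l = l.flatten := by
  induction l with
  | nil => rfl
  | cons a t ih =>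
    cases t with
    | nil => simp [PySem.Chars.join, List.intercalate]
    | cons b t2 =>
      simp only [PySem.Chars.join, List.intercalate, List.intersperse] at *
      simp_all

theorem pvJoinNilStr : PySem.Str.join "" ([] : List String) = "" := rfl

theorem pvJoinAppend (l : List String) (x : String) :
    PySem.Str.join "" (l ++ [x]) = PySem.Str.join "" l ++ x := by
  apply String.toList_inj.mp
  simp [PySem.Str.toList_join, pvJoinNilChars]

theorem stepA_zero (ws : List String) (c : String) :
    stepA (ws, c) "0" = (if c ≠ "" then ws ++ [c] else ws, "") := by
  by_cases h : c = ""
  · subst h; simp [stepA, PySem.Str.len_eq]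
  · simp [stepA, h]

theorem stepA_ne (ws : List String) (c x : String) (h : x ≠ "0") :
    stepA (ws, c) x = (ws, c ++ x) := by
  simp [stepA, h]

theorem stepB_zero (row : List String) (ws : List String) (p0 k0 : Int) :
    stepB row (ws, p0) (k0, "0")
      = (if PySem.Str.join "" (PySem.List.slice row (some p0) (some k0)) ≠ ""
           then ws ++ [PySem.Str.join "" (PySem.List.slice row (some p0) (some k0))] else ws,
         k0 + 1) := by
  simp [stepB]

theorem stepB_ne (row : List String) (ws : List String) (p0 k0 : Int) (x : String) (h : x ≠ "0") :
    stepB row (ws, p0) (k0, x) = (ws, p0) := by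
  simp [stepB, h]

theorem pvInnerEq (row : List String) :
    ∀ (tail : List String) (k prev : Nat) (ws : List String),
    row.drop k = tail → prev ≤ k →
    (tail.foldl stepA (ws, PySem.Str.join "" ((row.drop prev).take (k - prev)))).1
    = ((PySem.List.enumerate tail (k : Int)).foldl (stepB row) (ws, (prev : Int))).1 := by
  intro tail
  induction tail with
  | nil => intro k prev ws _ _; simp [PySem.List.enumerate_nil]
  | cons x xs ih =>
    intro k prev ws hdrop hpk
    have hxk : row[k]? = some x := by
      have h : (List.drop k row)[0]? = row[k + 0]? := List.getElem?_drop
      rw [hdrop] at h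
      simpa using h.symm
    have hdrop' : row.drop (k + 1) = xs := by
      rw [← List.tail_drop, hdrop]
      rfl
    have hcast : ((k : Int) + 1) = ((k + 1 : Nat) : Int) := by push_cast; ring
    rw [PySem.List.enumerate_cons, List.foldl_cons, List.foldl_cons, hcast]
    by_cases h0 : x = "0"
    · subst h0
      rw [stepA_zero, stepB_zero, PySem.List.slice_natCast]
      have H := ih (k + 1) (k + 1)
        (if PySem.Str.join "" ((row.drop prev).take (k - prev)) ≠ ""
           then ws ++ [PySem.Str.join "" ((row.drop prev).take (k - prev))] else ws)
        hdrop' (le_refl _)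
      simp only [Nat.sub_self, List.take_zero, pvJoinNilStr] at H
      exact H
    · rw [stepA_ne _ _ _ h0, stepB_ne _ _ _ _ _ h0]
      have hcur : (row.drop prev).take (k + 1 - prev) = (row.drop prev).take (k - prev) ++ [x] := by
        have h1 : k + 1 - prev = (k - prev) + 1 := by omega
        rw [h1, List.take_add_one]
        have h2 : (row.drop prev)[k - prev]? = some x := by
          rw [List.getElem?_drop]
          have h3 : prev + (k - prev) = k := by omega
          rw [h3, hxk]
        rw [h2]
        rfl
      have H := ih (k + 1) prev ws hdrop' (by omega)
      rw [hcur, pvJoinAppend] at H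
      exact H

theorem pvOuterEq : ∀ (p : List (List String)) (ws : List String),
    p.foldl (fun words_h row => (row.foldl stepA (words_h, "")).1) ws
    = p.foldl (fun words row => ((PySem.List.enumerate row 0).foldl (stepB row) (words, 0)).1) ws := by
  intro p
  induction p with
  | nil => intro ws; rfl
  | cons row rest ih =>
    intro ws
    simp only [List.foldl_cons]
    rw [← ih]
    congr 1
    have H := pvInnerEq row row 0 0 ws rfl (le_refl 0)
    simpa [pvJoinNilStr] using H

-- ===== VERDICT (by name: the statement is the Claim_ definition above) =====
theorem get_h_words_spec : Claim_equal_get_h_words := by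
  intro p _
  show get_h_words p = get_h_words_alt p
  unfold get_h_words get_h_words_alt
  exact pvOuterEq p []
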